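-- pv_equiv track=rewrite | github.com/LEO2822/rfp-ofsaa | test_generator.py | generate_test_parameters
-- ===== SOURCE A (Python) =====
-- from typing import Dict, List, Set, Any
--
-- def generate_test_parameters(args: List[str]) -> Dict[str, str]:
--     """Generate test parameters based on argument names."""
--     params = {}
--     for arg in args:
--         if 'id' in arg.lower():
--             params[arg] = "1"
--         elif 'name' in arg.lower() or 'str' in arg.lower():
--             params[arg] = f'"{arg}_test"'
--         elif 'count' in arg.lower() or 'num' in arg.lower() or 'size' in arg.lower():
--             params[arg] = "10"
--         elif 'list' in arg.lower() or 'items' in arg.lower():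
--             params[arg] = "[1, 2, 3]"
--         elif 'dict' in arg.lower() or 'data' in arg.lower():
--             params[arg] = '{"key": "value"}'
--         elif 'bool' in arg.lower() or 'flag' in arg.lower():
--             params[arg] = "True"
--         else:
--             params[arg] = f'"{arg}"'
--     return params
-- ===== SOURCE B (Python) =====
-- _CATEGORIES = [
--     (["id"], None, "1"),
--     (["name", "str"], "_test", None),
--     (["count", "num", "size"], None, "10"),
--     (["list", "items"], None, "[1, 2, 3]"),
--     (["dict", "data"], None, '{"key": "value"}'),
--     (["bool", "flag"], None, "True"),
-- ]
--
--
-- def generate_test_parameters(args):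
--     # Staged passes with the loops inverted: the outer loop runs over the six
--     # category rules; each pass fills still-unassigned slots of a parallel
--     # values list. A final pass renders the defaults and builds the dict.
--     lows = [a.lower() for a in args]
--     values = [None] * len(args)
--     for keywords, suffix, const in _CATEGORIES:
--         for i, low in enumerate(lows):
--             if values[i] is None and any(kw in low for kw in keywords):
--                 values[i] = const if suffix is None else f'"{args[i]}{suffix}"'
--     return {a: (v if v is not None else f'"{a}"') for a, v in zip(args, values)}
-- ===== Notes on version B (the rewrite author's own statement) =====
-- stated objective: alternative
-- what changed: Inverts the loop nesting: instead of A's per-argument elif chain, B makes six staged passes (outer loop over category rules) that fill still-unassigned slots of a parallel values list, then one final pass renders defaults and builds the dict.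
import Mathlib
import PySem

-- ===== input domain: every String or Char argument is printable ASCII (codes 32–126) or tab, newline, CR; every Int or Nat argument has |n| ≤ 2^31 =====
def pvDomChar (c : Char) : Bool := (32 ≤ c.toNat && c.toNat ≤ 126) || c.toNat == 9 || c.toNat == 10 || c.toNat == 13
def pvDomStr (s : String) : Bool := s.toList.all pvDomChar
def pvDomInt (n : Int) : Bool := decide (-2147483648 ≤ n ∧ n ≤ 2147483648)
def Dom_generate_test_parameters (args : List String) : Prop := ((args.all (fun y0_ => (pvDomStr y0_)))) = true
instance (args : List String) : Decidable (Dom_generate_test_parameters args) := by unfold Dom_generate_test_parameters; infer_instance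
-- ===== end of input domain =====

-- B inverts the loops: staged passes — the OUTER loop runs over the six category rules, each pass
-- filling still-unassigned slots of a parallel values list; a final pass renders defaults and builds
-- the dict. Alternative decomposition, same cost.

-- ===== PORT A =====
def generate_test_parameters (args : List String) : List (String × String) :=
  (args.foldl (fun params arg =>
    if PySem.Str.isIn "id" (PySem.Str.lower arg) then
      PySem.Dict.insert params arg "1"
    else if PySem.Str.isIn "name" (PySem.Str.lower arg) || PySem.Str.isIn "str" (PySem.Str.lower arg) then
      PySem.Dict.insert params arg ("\"" ++ arg ++ "_test\"")
    else if PySem.Str.isIn "count" (PySem.Str.lower arg) || PySem.Str.isIn "num" (PySem.Str.lower arg) || PySem.Str.isIn "size" (PySem.Str.lower arg) then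
      PySem.Dict.insert params arg "10"
    else if PySem.Str.isIn "list" (PySem.Str.lower arg) || PySem.Str.isIn "items" (PySem.Str.lower arg) then
      PySem.Dict.insert params arg "[1, 2, 3]"
    else if PySem.Str.isIn "dict" (PySem.Str.lower arg) || PySem.Str.isIn "data" (PySem.Str.lower arg) then
      PySem.Dict.insert params arg "{\"key\": \"value\"}"
    else if PySem.Str.isIn "bool" (PySem.Str.lower arg) || PySem.Str.isIn "flag" (PySem.Str.lower arg) then
      PySem.Dict.insert params arg "True"
    else
      PySem.Dict.insert params arg ("\"" ++ arg ++ "\"")) PySem.Dict.empty).items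

-- ===== PORT B =====
-- Source B's _CATEGORIES table: (keywords, optional per-arg suffix, constant value)
def pvCategories : List (List String × Option String × String) :=
  [ (["id"], none, "1"),
    (["name", "str"], some "_test", ""),
    (["count", "num", "size"], none, "10"),
    (["list", "items"], none, "[1, 2, 3]"),
    (["dict", "data"], none, "{\"key\": \"value\"}"),
    (["bool", "flag"], none, "True") ]

-- one slot update of a category pass (the body of Source B's inner loop): a slot is (arg, low, value)
def pvAssign (arg low : String) (kws : List String) (suffix : Option String) (const : String)
    (v : Option String) : Option String :=
  match v with
  | some w => some w
  | none =>
    if kws.any (fun kw => PySem.Str.isIn kw low) then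
      some (match suffix with
            | none => const
            | some suf => "\"" ++ arg ++ suf ++ "\"")
    else none

def generate_test_parameters_alt (args : List String) : List (String × String) :=
  let slots := args.map (fun a => (a, PySem.Str.lower a, (none : Option String)))
  let filled := pvCategories.foldl
    (fun sl c => sl.map (fun t => (t.1, t.2.1, pvAssign t.1 t.2.1 c.1 c.2.1 c.2.2 t.2.2))) slots
  (filled.foldl
    (fun d t => PySem.Dict.insert d t.1 (t.2.2.getD ("\"" ++ t.1 ++ "\""))) PySem.Dict.empty).items

-- ===== PRECONDITION & SPEC =====
def Spec_generate_test_parameters (args : List String) (out : List (String × String)) : Prop := out = generate_test_parameters_alt args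
instance (args : List String) (out : List (String × String)) : Decidable (Spec_generate_test_parameters args out) := by unfold Spec_generate_test_parameters; infer_instance

-- ===== CLAIM (what is proved, stated in full; the proofs are below) =====
def Claim_equal_generate_test_parameters : Prop := ∀ (args : List String), Dom_generate_test_parameters args → Spec_generate_test_parameters args (generate_test_parameters args)

-- ===== LEMMAS AND PROOFS =====
-- a fold of per-slot maps is the map of the per-slot fold
theorem pvFoldMap {C T : Type} (f : C → T → T) (cs : List C) (xs : List T) :
    cs.foldl (fun sl c => sl.map (f c)) xs = xs.map (fun t => cs.foldl (fun t c => f c t) t) := by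
  induction cs generalizing xs with
  | nil => simp
  | cons c cs ih => simp [List.foldl_cons, ih, List.map_map, Function.comp]

-- running the six category passes on one slot, then rendering the default, is A's elif chain
set_option maxHeartbeats 4000000 in
theorem pvVal_eq (arg : String) :
    (pvCategories.foldl (fun v c => pvAssign arg (PySem.Str.lower arg) c.1 c.2.1 c.2.2 v)
        (none : Option String)).getD ("\"" ++ arg ++ "\"") =
    (if PySem.Str.isIn "id" (PySem.Str.lower arg) then "1"
    else if PySem.Str.isIn "name" (PySem.Str.lower arg) || PySem.Str.isIn "str" (PySem.Str.lower arg) then "\"" ++ arg ++ "_test\""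
    else if PySem.Str.isIn "count" (PySem.Str.lower arg) || PySem.Str.isIn "num" (PySem.Str.lower arg) || PySem.Str.isIn "size" (PySem.Str.lower arg) then "10"
    else if PySem.Str.isIn "list" (PySem.Str.lower arg) || PySem.Str.isIn "items" (PySem.Str.lower arg) then "[1, 2, 3]"
    else if PySem.Str.isIn "dict" (PySem.Str.lower arg) || PySem.Str.isIn "data" (PySem.Str.lower arg) then "{\"key\": \"value\"}"
    else if PySem.Str.isIn "bool" (PySem.Str.lower arg) || PySem.Str.isIn "flag" (PySem.Str.lower arg) then "True"
    else "\"" ++ arg ++ "\"") := by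
  unfold pvCategories pvAssign
  simp only [List.foldl_cons, List.foldl_nil, List.any_cons, List.any_nil, Bool.or_false]
  cases h1 : PySem.Str.isIn "id" (PySem.Str.lower arg) <;>
  cases h2 : PySem.Str.isIn "name" (PySem.Str.lower arg) <;>
  cases h3 : PySem.Str.isIn "str" (PySem.Str.lower arg) <;>
  cases h4 : PySem.Str.isIn "count" (PySem.Str.lower arg) <;>
  cases h5 : PySem.Str.isIn "num" (PySem.Str.lower arg) <;>
  cases h6 : PySem.Str.isIn "size" (PySem.Str.lower arg) <;>
  cases h7 : PySem.Str.isIn "list" (PySem.Str.lower arg) <;>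
  cases h8 : PySem.Str.isIn "items" (PySem.Str.lower arg) <;>
  cases h9 : PySem.Str.isIn "dict" (PySem.Str.lower arg) <;>
  cases h10 : PySem.Str.isIn "data" (PySem.Str.lower arg) <;>
  cases h11 : PySem.Str.isIn "bool" (PySem.Str.lower arg) <;>
  cases h12 : PySem.Str.isIn "flag" (PySem.Str.lower arg) <;>
  first | rfl | simp [String.append_assoc]

-- ===== VERDICT (by name: the statement is the Claim_ definition above) =====
set_option maxHeartbeats 2000000 in
theorem generate_test_parameters_spec : Claim_equal_generate_test_parameters := by
  intro args _
  unfold Spec_generate_test_parameters generate_test_parameters generate_test_parameters_alt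
  dsimp only
  rw [pvFoldMap]
  rw [List.map_map, List.foldl_map]
  congr 1
  apply List.foldl_ext
  intro params arg _
  dsimp only [Function.comp]
  rw [show (pvCategories.foldl (fun t c => (t.1, t.2.1, pvAssign t.1 t.2.1 c.1 c.2.1 c.2.2 t.2.2))
        (arg, PySem.Str.lower arg, (none : Option String)))
      = (arg, PySem.Str.lower arg,
         pvCategories.foldl (fun v c => pvAssign arg (PySem.Str.lower arg) c.1 c.2.1 c.2.2 v) none) from rfl]
  rw [pvVal_eq]
  split_ifs <;> rfl
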